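-- pv_equiv track=rewrite | github.com/rydersd/ill-tool | src/adobe_mcp/apps/illustrator/drawing/shape_classify.py | _find_inflection_indices
-- ===== SOURCE A (Python) =====
-- def _sub2d(a, b):
--     """Subtract b from a."""
--     return [a[0] - b[0], a[1] - b[1]]
--
-- def _cross2d(a, b):
--     """2D cross product (z-component)."""
--     return a[0] * b[1] - a[1] * b[0]
--
-- def _find_inflection_indices(pts):
--     """Find inflection points where curvature sign changes.
--
--     Returns list of indices, always including first and last.
--     """
--     result = [0]
--     if len(pts) < 3:
--         if len(pts) > 1:
--             result.append(len(pts) - 1)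
--         return result
--
--     prev_sign = 0
--     for i in range(1, len(pts) - 1):
--         v1 = _sub2d(pts[i], pts[i - 1])
--         v2 = _sub2d(pts[i + 1], pts[i])
--         cp = _cross2d(v1, v2)
--         sign = 1 if cp > 0 else (-1 if cp < 0 else 0)
--         if sign != 0 and prev_sign != 0 and sign != prev_sign:
--             result.append(i)
--         if sign != 0:
--             prev_sign = sign
--
--     result.append(len(pts) - 1)
--     return result
-- ===== SOURCE B (Python) =====
-- def _sub2d(a, b):
--     """Subtract b from a."""
--     return [a[0] - b[0], a[1] - b[1]]
--
-- def _cross2d(a, b):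
--     """2D cross product (z-component)."""
--     return a[0] * b[1] - a[1] * b[0]
--
-- def _find_inflection_indices(pts):
--     """Two-pass version: extract nonzero curvature signs, then detect changes pairwise."""
--     n = len(pts)
--     if n < 3:
--         return [0, n - 1] if n > 1 else [0]
--     sigs = []
--     for i in range(1, n - 1):
--         cp = _cross2d(_sub2d(pts[i], pts[i - 1]), _sub2d(pts[i + 1], pts[i]))
--         if cp != 0:
--             sigs.append((i, 1 if cp > 0 else -1))
--     changes = [j for (_, s), (j, t) in zip(sigs, sigs[1:]) if t != s]
--     return [0] + changes + [n - 1]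
-- ===== Notes on version B (the rewrite author's own statement) =====
-- stated objective: alternative
-- what changed: Replaces A's single fused scan carrying a running prev_sign and appending in place by two separate passes: one pass collecting (index, sign) pairs with nonzero cross product, then a pairwise zip over that filtered list emitting indices where adjacent signs differ.
-- outside the precondition, e.g. on _find_inflection_indices([[0], [1], [2]]): A raises IndexError, B raises IndexError
import Mathlib
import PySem

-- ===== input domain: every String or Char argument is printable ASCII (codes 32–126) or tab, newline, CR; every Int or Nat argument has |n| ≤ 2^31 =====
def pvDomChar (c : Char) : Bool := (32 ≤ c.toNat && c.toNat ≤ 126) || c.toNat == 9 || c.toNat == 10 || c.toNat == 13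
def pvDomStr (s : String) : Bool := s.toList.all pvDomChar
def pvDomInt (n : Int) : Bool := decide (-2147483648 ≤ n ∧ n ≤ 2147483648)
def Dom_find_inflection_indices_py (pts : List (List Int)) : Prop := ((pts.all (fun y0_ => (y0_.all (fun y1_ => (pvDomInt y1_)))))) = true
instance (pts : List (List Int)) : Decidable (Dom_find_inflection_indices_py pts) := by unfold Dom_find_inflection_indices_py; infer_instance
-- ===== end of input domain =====

-- B replaces A's fused running-sign scan by two passes (collect nonzero signs, then pairwise change detection); objective: alternative decomposition, same cost.


-- ===== PORT A =====
-- module helper _sub2d (a[0], a[1] via pyGetD; in range under Pre_)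
def pvSub2d (a b : List Int) : List Int :=
  [PySem.List.pyGetD a 0 0 - PySem.List.pyGetD b 0 0,
   PySem.List.pyGetD a 1 0 - PySem.List.pyGetD b 1 0]

-- module helper _cross2d
def pvCross2d (a b : List Int) : Int :=
  PySem.List.pyGetD a 0 0 * PySem.List.pyGetD b 1 0 -
  PySem.List.pyGetD a 1 0 * PySem.List.pyGetD b 0 0

def find_inflection_indices_py (pts : List (List Int)) : List Int :=
  let n : Int := pts.length
  if n < 3 then
    (if n > 1 then [0] ++ [n - 1] else [0])
  else
    let st := (PySem.List.pyRange 1 (n - 1) 1).foldl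
      (fun (st : Int × List Int) (i : Int) =>
        let v1 := pvSub2d (PySem.List.pyGetD pts i []) (PySem.List.pyGetD pts (i - 1) [])
        let v2 := pvSub2d (PySem.List.pyGetD pts (i + 1) []) (PySem.List.pyGetD pts i [])
        let cp := pvCross2d v1 v2
        let sign : Int := if cp > 0 then 1 else (if cp < 0 then -1 else 0)
        let res := if sign ≠ 0 ∧ st.1 ≠ 0 ∧ sign ≠ st.1 then st.2 ++ [i] else st.2
        (if sign ≠ 0 then sign else st.1, res))
      (0, [0])
    st.2 ++ [n - 1]

-- ===== PORT B =====
def find_inflection_indices_py_alt (pts : List (List Int)) : List Int :=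
  let n : Int := pts.length
  if n < 3 then
    (if n > 1 then [0, n - 1] else [0])
  else
    let sigs := (PySem.List.pyRange 1 (n - 1) 1).filterMap
      (fun (i : Int) =>
        let cp := pvCross2d (pvSub2d (PySem.List.pyGetD pts i []) (PySem.List.pyGetD pts (i - 1) []))
                            (pvSub2d (PySem.List.pyGetD pts (i + 1) []) (PySem.List.pyGetD pts i []))
        if cp ≠ 0 then some (i, if cp > 0 then (1 : Int) else -1) else none)
    let changes := (sigs.zip sigs.tail).filterMap
      (fun (p : (Int × Int) × (Int × Int)) => if p.2.2 ≠ p.1.2 then some p.2.1 else none)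
    [0] ++ changes ++ [n - 1]

-- ===== PRECONDITION & SPEC =====
-- Pre_ excludes exactly the inputs where Python A raises IndexError: with 3 or more points,
-- every point is indexed at [0] and [1], so every inner list must have length ≥ 2.
def Pre_find_inflection_indices_py (pts : List (List Int)) : Prop :=
  pts.length < 3 ∨ ∀ p ∈ pts, 2 ≤ p.length
instance (pts : List (List Int)) : Decidable (Pre_find_inflection_indices_py pts) := by
  unfold Pre_find_inflection_indices_py; infer_instance
def pvWitness_find_inflection_indices_py : List (List Int) :=
  [[0, 0], [1, 1], [2, 0], [3, 1]]

def Spec_find_inflection_indices_py (pts : List (List Int)) (out : List Int) : Prop :=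
  out = find_inflection_indices_py_alt pts
instance (pts : List (List Int)) (out : List Int) : Decidable (Spec_find_inflection_indices_py pts out) := by
  unfold Spec_find_inflection_indices_py; infer_instance

-- ===== CLAIM (what is proved, stated in full; the proofs are below) =====
def Claim_equal_find_inflection_indices_py : Prop :=
  ∀ (pts : List (List Int)), Dom_find_inflection_indices_py pts →
    Pre_find_inflection_indices_py pts →
    Spec_find_inflection_indices_py pts (find_inflection_indices_py pts)

-- ===== LEMMAS AND PROOFS =====

-- curvature cross product at index i
def pvCp (pts : List (List Int)) (i : Int) : Int :=
  pvCross2d (pvSub2d (PySem.List.pyGetD pts i []) (PySem.List.pyGetD pts (i - 1) []))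
            (pvSub2d (PySem.List.pyGetD pts (i + 1) []) (PySem.List.pyGetD pts i []))

def pvSign (cp : Int → Int) (i : Int) : Int :=
  if cp i > 0 then 1 else (if cp i < 0 then -1 else 0)

def pvStep (cp : Int → Int) (st : Int × List Int) (i : Int) : Int × List Int :=
  let sign := pvSign cp i
  let res := if sign ≠ 0 ∧ st.1 ≠ 0 ∧ sign ≠ st.1 then st.2 ++ [i] else st.2
  (if sign ≠ 0 then sign else st.1, res)

def pvChg (cp : Int → Int) : Int → List Int → List Int
  | _, [] => []
  | p, i :: rest =>
      (if pvSign cp i ≠ 0 ∧ p ≠ 0 ∧ pvSign cp i ≠ p then [i] else []) ++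
        pvChg cp (if pvSign cp i ≠ 0 then pvSign cp i else p) rest

def pvSigs (cp : Int → Int) (L : List Int) : List (Int × Int) :=
  L.filterMap (fun i => if cp i ≠ 0 then some (i, if cp i > 0 then (1 : Int) else -1) else none)

def pvZipChg : Int → List (Int × Int) → List Int
  | _, [] => []
  | p, (i, s) :: rest => (if p ≠ 0 ∧ s ≠ p then [i] else []) ++ pvZipChg s rest

def pvZipF (lst : List (Int × Int)) : List Int :=
  (lst.zip lst.tail).filterMap
    (fun (p : (Int × Int) × (Int × Int)) => if p.2.2 ≠ p.1.2 then some p.2.1 else none)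

theorem pv_fold_chg (cp : Int → Int) (L : List Int) :
    ∀ (p : Int) (res : List Int),
      (L.foldl (pvStep cp) (p, res)).2 = res ++ pvChg cp p L := by
  induction L with
  | nil => intro p res; simp [pvChg]
  | cons i rest ih =>
      intro p res
      simp only [List.foldl_cons, pvChg]
      rw [show pvStep cp (p, res) i =
        ((if pvSign cp i ≠ 0 then pvSign cp i else p),
         (if pvSign cp i ≠ 0 ∧ p ≠ 0 ∧ pvSign cp i ≠ p then res ++ [i] else res)) from rfl]
      rw [ih]
      split_ifs <;> simp

theorem pv_chg_zip (cp : Int → Int) (L : List Int) :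
    ∀ p : Int, pvChg cp p L = pvZipChg p (pvSigs cp L) := by
  induction L with
  | nil => intro p; simp [pvChg, pvSigs, pvZipChg]
  | cons i rest ih =>
      intro p
      by_cases h : cp i = 0
      · have hs : pvSign cp i = 0 := by simp [pvSign, h]
        simp [pvChg, pvSigs, hs, h, ih p]
      · have hs : pvSign cp i = (if cp i > 0 then (1 : Int) else -1) := by
          simp only [pvSign]
          rcases lt_trichotomy (cp i) 0 with hlt | heq | hgt
          · simp [hlt, not_lt.mpr (le_of_lt hlt)]
          · exact absurd heq h
          · simp [hgt]
        have hsne : pvSign cp i ≠ 0 := by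
          rw [hs]; split_ifs <;> decide
        have hs0 : (if 0 < cp i then (1 : Int) else -1) ≠ 0 := by split_ifs <;> decide
        simp only [pvChg, pvSigs, List.filterMap_cons, if_pos h, pvZipChg]
        rw [ih]
        simp [pvSigs, hs, and_comm]
        simp [hs0]

theorem pv_zipchg_zipf_aux (lst : List (Int × Int)) :
    ∀ x : Int × Int, x.2 ≠ 0 → (∀ z ∈ lst, z.2 ≠ 0) →
      pvZipChg x.2 lst = pvZipF (x :: lst) := by
  induction lst with
  | nil => intro x _ _; simp [pvZipChg, pvZipF]
  | cons y rest ih =>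
      intro x hx hall
      obtain ⟨i, s⟩ := y
      have hy : s ≠ 0 := hall (i, s) (by simp)
      have := ih (i, s) hy (fun z hz => hall z (by simp [hz]))
      simp only [pvZipChg, pvZipF, List.tail_cons, List.zip_cons_cons, List.filterMap_cons] at *
      rw [this]
      simp [hx]
      split_ifs <;> simp

theorem pv_zipchg_zipf (lst : List (Int × Int)) (hall : ∀ z ∈ lst, z.2 ≠ 0) :
    pvZipChg 0 lst = pvZipF lst := by
  cases lst with
  | nil => rfl
  | cons x rest =>
      have hx : x.2 ≠ 0 := hall x (by simp)
      rw [show pvZipChg 0 (x :: rest) = pvZipChg x.2 rest by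
        obtain ⟨i, s⟩ := x; simp [pvZipChg]]
      exact pv_zipchg_zipf_aux rest x hx (fun z hz => hall z (by simp [hz]))

theorem pv_sigs_ne (cp : Int → Int) (L : List Int) :
    ∀ z ∈ pvSigs cp L, z.2 ≠ 0 := by
  intro z hz
  simp only [pvSigs, List.mem_filterMap] at hz
  obtain ⟨i, _, hi⟩ := hz
  by_cases h : cp i = 0
  · simp [h] at hi
  · simp only [if_pos h, Option.some.injEq] at hi
    subst hi
    split_ifs <;> simp

-- ===== VERDICT (by name: the statement is the Claim_ definition above) =====
theorem find_inflection_indices_py_spec : Claim_equal_find_inflection_indices_py := by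
  intro pts _ _
  unfold Spec_find_inflection_indices_py
  unfold find_inflection_indices_py find_inflection_indices_py_alt
  by_cases h : (pts.length : Int) < 3
  · simp only [if_pos h]
    split_ifs <;> rfl
  · simp only [if_neg h]
    have hfold :
        ((PySem.List.pyRange 1 ((pts.length : Int) - 1) 1).foldl (pvStep (pvCp pts)) (0, [0])).2
          = [0] ++ pvChg (pvCp pts) 0 (PySem.List.pyRange 1 ((pts.length : Int) - 1) 1) :=
      pv_fold_chg _ _ 0 [0]
    have hstep :
        (fun (st : Int × List Int) (i : Int) =>
          let v1 := pvSub2d (PySem.List.pyGetD pts i []) (PySem.List.pyGetD pts (i - 1) [])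
          let v2 := pvSub2d (PySem.List.pyGetD pts (i + 1) []) (PySem.List.pyGetD pts i [])
          let cp := pvCross2d v1 v2
          let sign : Int := if cp > 0 then 1 else (if cp < 0 then -1 else 0)
          let res := if sign ≠ 0 ∧ st.1 ≠ 0 ∧ sign ≠ st.1 then st.2 ++ [i] else st.2
          (if sign ≠ 0 then sign else st.1, res)) = pvStep (pvCp pts) := rfl
    rw [hstep, hfold, pv_chg_zip,
        pv_zipchg_zipf _ (pv_sigs_ne (pvCp pts) _)]
    simp [pvSigs, pvCp, pvZipF]
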